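-- pv_equiv track=rewrite | github.com/ashish0panda/tic-toc_Python | led.py | convertor
-- ===== SOURCE A (Python) =====
-- def convertor(strng):
--     lst=[" " for i in range(15)]
--     if strng=="1":
--         temp=[2,5,8,11,14]
--         for i in temp:
--             lst[i]="#"
--     elif strng=="2":
--         temp=[0,1,2,5,6,7,8,9,12,13,14]
--         for i in temp:
--             lst[i]="#"
--     elif strng=="3":
--         temp=[0,1,2,5,6,7,8,11,12,13,14]
--         for i in temp:
--             lst[i]="#"
--     elif strng=="4":
--         temp=[0,2,3,5,6,7,8,11,14]
--         for i in temp: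
--             lst[i]="+"
--     elif strng=="5":
--         temp=[0,1,2,3,6,7,8,11,12,13,14]
--         for i in temp:
--             lst[i]="#"
--     elif strng=="6":
--         temp=[0,1,2,3,6,7,8,9,11,12,13,14]
--         for i in temp:
--             lst[i]="#"
--     elif strng=="7":
--         temp=[0,1,2,5,8,11,14]
--         for i in temp:
--             lst[i]="#"
--     elif strng=="8":
--         temp=[0,1,2,3,5,6,7,8,9,11,12,13,14]
--         for i in temp:
--             lst[i]="#"
--     elif strng=="9":
--         temp=[0,1,2,3,5,6,7,8,11,12,13,14]
--         for i in temp: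
--             lst[i]="#"
--     else:
--         temp=[0,1,2,3,5,6,8,9,11,12,13,14]
--         for i in temp:
--             lst[i]="#"
--     return(lst)
-- ===== SOURCE B (Python) =====
-- # B renders the 5x3 grid geometrically from a seven-segment encoding (horizontal bars on
-- # even rows, vertical half-columns), instead of writing literal cell indices per digit.
-- _SEG = {
--     "1": {"TR", "BR"},
--     "2": {"T", "TR", "M", "BL", "B"},
--     "3": {"T", "TR", "M", "BR", "B"},
--     "4": {"TL", "TR", "M", "BR"},
--     "5": {"T", "TL", "M", "BR", "B"},
--     "6": {"T", "TL", "M", "BL", "BR", "B"},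
--     "7": {"T", "TR", "BR"},
--     "8": {"T", "TL", "TR", "M", "BL", "BR", "B"},
--     "9": {"T", "TL", "TR", "M", "BR", "B"},
--     "0": {"T", "TL", "TR", "BL", "BR", "B"},
-- }
--
-- def convertor(strng):
--     segs = _SEG.get(strng, _SEG["0"])
--     ch = "+" if strng == "4" else "#"
--     out = []
--     for r in range(5):
--         for c in range(3):
--             lit = r % 2 == 0 and ("T", "M", "B")[r // 2] in segs
--             if c == 0:
--                 lit = lit or ("TL" in segs and r <= 2) or ("BL" in segs and r >= 2)
--             elif c == 2:
--                 lit = lit or ("TR" in segs and r <= 2) or ("BR" in segs and r >= 2)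
--             out.append(ch if lit else " ")
--     return out
-- ===== Notes on version B (the rewrite author's own statement) =====
-- stated objective: alternative
-- what changed: Instead of mutating a blank 15-cell list with per-digit literal index lists via an elif chain, B encodes each digit as a set of seven-segment segments and renders the 5x3 grid geometrically (horizontal bars on even rows, vertical half-columns) in one nested row/column loop.
import Mathlib
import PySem

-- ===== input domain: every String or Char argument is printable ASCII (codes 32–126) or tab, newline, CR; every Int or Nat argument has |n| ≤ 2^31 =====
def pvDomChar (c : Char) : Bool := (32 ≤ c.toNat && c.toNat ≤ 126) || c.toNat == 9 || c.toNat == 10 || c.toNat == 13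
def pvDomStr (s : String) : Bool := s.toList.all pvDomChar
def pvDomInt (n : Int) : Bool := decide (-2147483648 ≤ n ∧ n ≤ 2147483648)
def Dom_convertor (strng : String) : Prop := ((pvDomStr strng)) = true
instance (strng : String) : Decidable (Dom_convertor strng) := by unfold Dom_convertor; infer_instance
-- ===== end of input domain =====

-- B renders each digit geometrically from a seven-segment encoding (horizontal bars on even rows,
-- vertical half-columns) instead of A's elif chain writing literal cell indices (objective: alternative).


-- ===== PORT A =====
-- literal transliteration: blank list of 15 cells, then each branch sets its indices in order
def convertor (strng : String) : List String :=
  let lst := (PySem.List.pyRange 0 15 1).map (fun _ => " ")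
  if strng = "1" then
    [2,5,8,11,14].foldl (fun l (i : Nat) => l.set i "#") lst
  else if strng = "2" then
    [0,1,2,5,6,7,8,9,12,13,14].foldl (fun l (i : Nat) => l.set i "#") lst
  else if strng = "3" then
    [0,1,2,5,6,7,8,11,12,13,14].foldl (fun l (i : Nat) => l.set i "#") lst
  else if strng = "4" then
    [0,2,3,5,6,7,8,11,14].foldl (fun l (i : Nat) => l.set i "+") lst
  else if strng = "5" then
    [0,1,2,3,6,7,8,11,12,13,14].foldl (fun l (i : Nat) => l.set i "#") lst
  else if strng = "6" then
    [0,1,2,3,6,7,8,9,11,12,13,14].foldl (fun l (i : Nat) => l.set i "#") lst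
  else if strng = "7" then
    [0,1,2,5,8,11,14].foldl (fun l (i : Nat) => l.set i "#") lst
  else if strng = "8" then
    [0,1,2,3,5,6,7,8,9,11,12,13,14].foldl (fun l (i : Nat) => l.set i "#") lst
  else if strng = "9" then
    [0,1,2,3,5,6,7,8,11,12,13,14].foldl (fun l (i : Nat) => l.set i "#") lst
  else
    [0,1,2,3,5,6,8,9,11,12,13,14].foldl (fun l (i : Nat) => l.set i "#") lst

-- ===== PORT B =====
-- the module-level _SEG of Source B: digit → set of lit seven-segment segments
def segDict : PySem.Dict String (PySem.Set String) := PySem.Dict.mk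
  [("1", PySem.Set.ofList ["TR", "BR"]),
   ("2", PySem.Set.ofList ["T", "TR", "M", "BL", "B"]),
   ("3", PySem.Set.ofList ["T", "TR", "M", "BR", "B"]),
   ("4", PySem.Set.ofList ["TL", "TR", "M", "BR"]),
   ("5", PySem.Set.ofList ["T", "TL", "M", "BR", "B"]),
   ("6", PySem.Set.ofList ["T", "TL", "M", "BL", "BR", "B"]),
   ("7", PySem.Set.ofList ["T", "TR", "BR"]),
   ("8", PySem.Set.ofList ["T", "TL", "TR", "M", "BL", "BR", "B"]),
   ("9", PySem.Set.ofList ["T", "TL", "TR", "M", "BR", "B"]),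
   ("0", PySem.Set.ofList ["T", "TL", "TR", "BL", "BR", "B"])]

def convertor_alt (strng : String) : List String :=
  -- segs = _SEG.get(strng, _SEG["0"])  ("0" is present, so the KeyError case of _SEG["0"] is unreachable)
  let segs := PySem.Dict.getD segDict strng ((PySem.Dict.get? segDict "0").getD [])
  let ch := if strng = "4" then "+" else "#"
  (PySem.List.pyRange 0 5 1).foldl (fun out r =>
    (PySem.List.pyRange 0 3 1).foldl (fun out c =>
      -- ("T","M","B")[r//2]: tuple index, ported via pyGetD (r//2 ∈ {0,1,2} here, so exact)
      let lit0 := decide (PySem.Int.mod r 2 = 0) &&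
        PySem.Set.contains segs (PySem.List.pyGetD ["T", "M", "B"] (PySem.Int.floordiv r 2) "")
      let lit :=
        if c = 0 then
          lit0 || (PySem.Set.contains segs "TL" && decide (r ≤ 2)) ||
            (PySem.Set.contains segs "BL" && decide (2 ≤ r))
        else if c = 2 then
          lit0 || (PySem.Set.contains segs "TR" && decide (r ≤ 2)) ||
            (PySem.Set.contains segs "BR" && decide (2 ≤ r))
        else lit0
      out ++ [if lit then ch else " "]) out) []

-- ===== PRECONDITION & SPEC =====
def Spec_convertor (strng : String) (out : List String) : Prop := out = convertor_alt strng
instance (strng : String) (out : List String) : Decidable (Spec_convertor strng out) := by unfold Spec_convertor; infer_instance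

-- ===== CLAIM (what is proved, stated in full; the proofs are below) =====
def Claim_equal_convertor : Prop := ∀ (strng : String), Dom_convertor strng → Spec_convertor strng (convertor strng)

-- ===== LEMMAS AND PROOFS =====

-- ===== VERDICT (by name: the statement is the Claim_ definition above) =====
theorem convertor_spec : Claim_equal_convertor := by
  intro strng _
  unfold Spec_convertor convertor
  split_ifs with h1 h2 h3 h4 h5 h6 h7 h8 h9
  · subst h1; decide
  · subst h2; decide
  · subst h3; decide
  · subst h4; decide
  · subst h5; decide
  · subst h6; decide
  · subst h7; decide
  · subst h8; decide
  · subst h9; decide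
  · by_cases h0 : strng = "0"
    · subst h0; decide
    · have hseg : PySem.Dict.getD segDict strng ((PySem.Dict.get? segDict "0").getD []) =
          PySem.Set.ofList ["T", "TL", "TR", "BL", "BR", "B"] := by
        simp [segDict, PySem.Dict.getD, PySem.Dict.get?, beq_iff_eq,
          Ne.symm h1, Ne.symm h2, Ne.symm h3, Ne.symm h4, Ne.symm h5,
          Ne.symm h6, Ne.symm h7, Ne.symm h8, Ne.symm h9, Ne.symm h0]
      unfold convertor_alt
      simp only [hseg, if_neg h4]
      decide
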